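-- pv_equiv track=rewrite | github.com/kgpksh/Learning_record | Algorithm/Programmers/Python/Level 3/최고의 집합.py | solution
-- ===== SOURCE A (Python) =====
-- def solution(n, s):
--     if s < n :
--         return [-1]
--
--     div = s // n
--     answer = [div] * n
--     for i in range(1, s - div * n + 1) :
--         answer[-i] += 1
--     return answer
-- ===== SOURCE B (Python) =====
-- def solution(n, s):
--     if s < n:
--         return [-1]
--     answer = []
--     remaining, k = s, n
--     while k > 0:
--         q = remaining // k
--         answer.append(q)
--         remaining -= q
--         k -= 1
--     return answer
-- ===== Notes on version B (the rewrite author's own statement) =====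
-- stated objective: alternative
-- what changed: Replaces divmod-then-increment-the-last-slots with a single greedy pass that assigns each position the floor of the remaining sum over the remaining count, never computing s%n or touching an element twice.
-- outside the precondition, e.g. on solution(0, 0): A raises ZeroDivisionError, B returns []
import Mathlib
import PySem

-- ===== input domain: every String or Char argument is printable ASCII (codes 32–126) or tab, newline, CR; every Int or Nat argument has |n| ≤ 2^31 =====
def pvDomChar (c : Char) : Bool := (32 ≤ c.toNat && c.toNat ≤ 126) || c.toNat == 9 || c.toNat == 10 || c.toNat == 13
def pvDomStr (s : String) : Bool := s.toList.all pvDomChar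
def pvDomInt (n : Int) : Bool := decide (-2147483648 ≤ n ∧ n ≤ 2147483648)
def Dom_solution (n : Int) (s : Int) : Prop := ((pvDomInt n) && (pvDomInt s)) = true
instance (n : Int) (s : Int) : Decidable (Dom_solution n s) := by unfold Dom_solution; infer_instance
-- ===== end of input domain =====

-- B replaces A's divmod-then-increment loop by a one-pass greedy that gives each
-- position the floor of the remaining sum over the remaining count (objective: alternative).
-- ===== PORT A =====
def solution (n : Int) (s : Int) : List Int :=
  if s < n then [-1]
  else
    let div := PySem.Int.floordiv s n
    let answer := Array.replicate n.toNat div      -- answer = [div] * n (Python's mutable list as an Array)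
    ((PySem.List.pyRange 1 (s - div * n + 1) 1).foldl
      (fun ans i =>
        match PySem.List.pyIdx? ans.size (-i) with    -- Python's negative-index resolution for answer[-i]
        | some j => ans.setIfInBounds j (ans[j]! + 1) -- answer[-i] += 1 (in range: a plain set)
        | none => ans)                                -- out of range: Python raises IndexError, never reached inside Pre_
      answer).toList

-- ===== PORT B =====
-- the 'while k > 0' loop of Source B, counting k down; 'answer.append(q)' becomes the cons
def pvGreedy : Nat → Int → List Int
  | 0, _ => []
  | k + 1, remaining =>
    let q := PySem.Int.floordiv remaining ((k : Int) + 1)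
    q :: pvGreedy k (remaining - q)

def solution_alt (n : Int) (s : Int) : List Int :=
  if s < n then [-1]
  else pvGreedy n.toNat s    -- k runs n, n-1, …, 1; the loop body never runs when n ≤ 0

-- ===== PRECONDITION & SPEC =====
-- Pre_ excludes only n = 0 with 0 <= s, where A raises ZeroDivisionError (s // n).
def Pre_solution (n : Int) (s : Int) : Prop := n ≠ 0 ∨ s < 0
instance (n : Int) (s : Int) : Decidable (Pre_solution n s) := by unfold Pre_solution; infer_instance
def pvWitness_solution : Int × Int := (3, 11)
def Spec_solution (n : Int) (s : Int) (out : List Int) : Prop := out = solution_alt n s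
instance (n : Int) (s : Int) (out : List Int) : Decidable (Spec_solution n s out) := by unfold Spec_solution; infer_instance

-- ===== CLAIM (what is proved, stated in full; the proofs are below) =====
def Claim_equal_solution : Prop := ∀ (n : Int) (s : Int), Dom_solution n s → Pre_solution n s → Spec_solution n s (solution n s)

-- ===== LEMMAS AND PROOFS =====

-- the loop step of A's port, on the Array state and on its List model
def pvStepA (ans : Array Int) (i : Int) : Array Int :=
  match PySem.List.pyIdx? ans.size (-i) with
  | some j => ans.setIfInBounds j (ans[j]! + 1)
  | none => ans

def pvStep (ans : List Int) (i : Int) : List Int :=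
  PySem.List.pySetD ans (-i) (PySem.List.pyGetD ans (-i) 0 + 1)

lemma pvIdx?_lt (m : Nat) (i : Int) (j : Nat) (h : PySem.List.pyIdx? m i = some j) : j < m := by
  simp only [PySem.List.pyIdx?] at h
  split_ifs at h <;> simp_all <;> omega

lemma pvStepA_toList (a : Array Int) (i : Int) : (pvStepA a i).toList = pvStep a.toList i := by
  unfold pvStepA pvStep
  cases h : PySem.List.pyIdx? a.size (-i) with
  | none => simp [PySem.List.pySetD, PySem.List.pySet?, h]
  | some j =>
    have hj' : j < a.size := pvIdx?_lt _ _ _ h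
    simp [PySem.List.pySetD, PySem.List.pySet?, PySem.List.pyGetD, PySem.List.pyGet?, h, hj']

lemma pvFoldA (l : List Int) (a : Array Int) :
    (l.foldl pvStepA a).toList = l.foldl pvStep a.toList := by
  induction l generalizing a with
  | nil => rfl
  | cons x xs ih => simp [List.foldl_cons, ih, pvStepA_toList]

lemma pvSetD_neg (xs : List Int) (k : Nat) (v : Int) (h1 : 0 < k) (h2 : k ≤ xs.length) :
    PySem.List.pySetD xs (-(k : Int)) v = xs.set (xs.length - k) v := by
  simp only [PySem.List.pySetD, PySem.List.pySet?, PySem.List.pyIdx?]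
  split_ifs with h <;> simp_all

lemma pvStep_block (N k : Nat) (d : Int) (hk : k < N) :
    pvStep (List.replicate (N - k) d ++ List.replicate k (d + 1)) ((k : Int) + 1)
      = List.replicate (N - (k + 1)) d ++ List.replicate (k + 1) (d + 1) := by
  set xs := List.replicate (N - k) d ++ List.replicate k (d + 1) with hxs
  have hlen : xs.length = N := by simp [hxs]; omega
  have hcast : (k : Int) + 1 = ((k + 1 : Nat) : Int) := by push_cast; ring
  have hget : PySem.List.pyGetD xs (-((k + 1 : Nat) : Int)) 0 = d := by
    rw [PySem.List.pyGetD_neg_natCast xs (k + 1) 0 (by omega) (by omega)]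
    have hi : xs.length - (k + 1) < (List.replicate (N - k) d).length := by
      simp; omega
    rw [List.getElem_append_left hi, List.getElem_replicate]
  have hsplit : xs = List.replicate (N - (k + 1)) d ++ d :: List.replicate k (d + 1) := by
    rw [hxs, show N - k = (N - (k + 1)) + 1 by omega, List.replicate_succ']
    simp
  unfold pvStep
  rw [hcast, hget, pvSetD_neg xs (k + 1) (d + 1) (by omega) (by omega), hlen, hsplit]
  rw [show N - (k + 1) = (List.replicate (N - (k + 1)) (d : Int)).length by simp]
  simp [List.replicate_succ]

lemma pvLoop_blocks (N : Nat) (d : Int) (k : Nat) (hk : k ≤ N) :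
    (PySem.List.pyRange 1 ((k : Int) + 1) 1).foldl pvStep (List.replicate N d)
      = List.replicate (N - k) d ++ List.replicate k (d + 1) := by
  induction k with
  | zero => simp [PySem.List.pyRange_one_eq_nil]
  | succ k ih =>
    rw [show ((k + 1 : Nat) : Int) + 1 = ((k : Int) + 1) + 1 by push_cast; ring,
        PySem.List.pyRange_one_succ_right (by omega), List.foldl_append, ih (by omega)]
    simpa using pvStep_block N k d (by omega)

-- the greedy invariant: with remaining = d*k + r, 0 ≤ r < k, the pass emits
-- k - r copies of d followed by r copies of d + 1
lemma pvGreedy_blocks (k : Nat) (d : Int) (r : Nat) (hr : r < k) :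
    pvGreedy k (d * k + r) = List.replicate (k - r) d ++ List.replicate r (d + 1) := by
  induction k generalizing d r with
  | zero => omega
  | succ k ih =>
    have hq : PySem.Int.floordiv (d * (k + 1 : Nat) + r) ((k : Int) + 1) = d := by
      rw [show ((k + 1 : Nat) : Int) = (k : Int) + 1 by push_cast; ring,
          PySem.Int.floordiv_eq_iff_of_pos (by omega)]
      constructor <;> [omega; nlinarith [Int.natCast_nonneg r, show (r : Int) < (k : Int) + 1 by exact_mod_cast hr]]
    show (PySem.Int.floordiv (d * (k + 1 : Nat) + r) ((k : Int) + 1)) ::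
        pvGreedy k (d * (k + 1 : Nat) + r - PySem.Int.floordiv (d * (k + 1 : Nat) + r) ((k : Int) + 1))
      = _
    rw [hq]
    have hrem : d * ((k + 1 : Nat) : Int) + r - d = d * k + r := by push_cast; ring
    rw [hrem]
    by_cases hlt : r < k
    · rw [ih d r hlt, show (k + 1) - r = (k - r) + 1 by omega, List.replicate_succ]
      simp
    · -- r = k
      have hrk : r = k := by omega
      subst hrk
      rcases Nat.eq_zero_or_pos r with h0 | hpos
      · subst h0; simp [pvGreedy]
      · have : d * (r : Int) + r = (d + 1) * r + (0 : Nat) := by push_cast; ring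
        rw [this, ih (d + 1) 0 hpos]
        simp [List.replicate_succ]

-- ===== VERDICT (by name: the statement is the Claim_ definition above) =====
theorem solution_spec : Claim_equal_solution := by
  intro n s hdom hpre
  unfold Spec_solution solution solution_alt
  by_cases hs : s < n
  · simp [hs]
  · have hn0 : n ≠ 0 := by
      rcases hpre with h | h
      · exact h
      · intro h0; omega
    simp only [if_neg hs]
    set d := PySem.Int.floordiv s n with hd
    set r := PySem.Int.mod s n with hr
    have hsr : d * n + r = s := PySem.Int.floordiv_mul_add_mod s n
    rcases lt_or_gt_of_ne hn0 with hneg | hpos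
    · -- n < 0 : both sides are []
      have hb := PySem.Int.mod_neg_bounds (a:=s) hneg
      have h1 : n.toNat = 0 := by omega
      rw [show s - d * n + 1 = r + 1 by omega]
      rw [PySem.List.pyRange_one_eq_nil (by omega)]
      simp [h1, pvGreedy]
    · -- n > 0
      have hrlo : 0 ≤ r := PySem.Int.mod_nonneg (a:=s) hpos
      have hrhi : r < n := PySem.Int.mod_lt (a:=s) hpos
      rw [show s - d * n + 1 = (r.toNat : Int) + 1 by omega]
      rw [show (fun (ans : Array Int) (i : Int) =>
            match PySem.List.pyIdx? ans.size (-i) with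
            | some j => ans.setIfInBounds j (ans[j]! + 1)
            | none => ans) = pvStepA from rfl]
      rw [pvFoldA, Array.toList_replicate]
      rw [pvLoop_blocks n.toNat d r.toNat (by omega)]
      rw [show s = d * (n.toNat : Int) + (r.toNat : Int) by
        rw [Int.toNat_of_nonneg (by omega), Int.toNat_of_nonneg hrlo]; omega]
      rw [pvGreedy_blocks n.toNat d r.toNat (by omega)]
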